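-- pv_equiv track=rewrite | github.com/CaptainCollie/tetrika_test_assignment | task1/subtask1.py | task
-- ===== SOURCE A (Python) =====
-- def task(string: str):
--     left, right = 0, len(string) - 1
--     while left <= right:
--         mid = (left + right) // 2
--         curr = string[mid] == "0"
--         prev = string[mid - 1] == "1"
--         if curr and prev:
--             return mid
--         elif curr and mid == 0:
--             return mid
--         elif curr and not prev:
--             right = mid - 1
--         else:
--             left = mid + 1
--     return -1
-- ===== SOURCE B (Python) =====
-- def task(string: str):
--     def go(base, size):
--         if size == 0:
--             return -1
--         half = (size - 1) // 2
--         mid = base + half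
--         if string[mid] == "0":
--             if mid == 0 or string[mid - 1] == "1":
--                 return mid
--             return go(base, half)
--         return go(mid + 1, size // 2)
--     return go(0, len(string))
-- ===== Notes on version B (the rewrite author's own statement) =====
-- stated objective: alternative
-- what changed: A's iterative Int left/right while-loop with precomputed curr/prev flags and a string[-1] wraparound read becomes a recursion over a (base, size) sub-range in natural-number arithmetic (left size (size-1)//2, right size size//2), testing mid==0 before reading string[mid-1] so the wraparound read and the redundant second accepting branch disappear.
import Mathlib
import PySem

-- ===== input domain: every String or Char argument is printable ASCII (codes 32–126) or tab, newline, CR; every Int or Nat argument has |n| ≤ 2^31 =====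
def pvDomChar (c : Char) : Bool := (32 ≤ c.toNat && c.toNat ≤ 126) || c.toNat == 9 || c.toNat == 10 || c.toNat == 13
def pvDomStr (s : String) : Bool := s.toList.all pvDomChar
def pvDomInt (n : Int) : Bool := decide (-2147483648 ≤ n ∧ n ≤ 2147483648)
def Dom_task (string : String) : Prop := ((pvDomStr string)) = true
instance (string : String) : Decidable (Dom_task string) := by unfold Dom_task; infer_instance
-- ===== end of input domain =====

-- B replaces A's iterative Int left/right while-loop (precomputed curr/prev flags, string[-1]
-- wrap-around read) by a recursion over a (base, size) sub-range in natural-number arithmetic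
-- that tests mid == 0 before reading string[mid-1] (alternative decomposition, same cost).

-- mid = (left+right)//2 stays between left and right; needed for termination of A's port
theorem pvMidBounds (left right : Int) (h : left ≤ right) :
    left ≤ PySem.Int.floordiv (left + right) 2 ∧ PySem.Int.floordiv (left + right) 2 ≤ right := by
  rw [PySem.Int.floordiv_eq_ediv_of_pos (by norm_num : (0:Int) < 2)]
  omega

-- ===== PORT A =====
-- the while-loop of A: state (left, right), four branches in A's order
def taskGo (s : List Char) (left right : Int) : Int :=
  if h : left ≤ right then
    let mid := PySem.Int.floordiv (left + right) 2
    let curr : Bool := PySem.List.pyGet? s mid == some '0'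
    let prev : Bool := PySem.List.pyGet? s (mid - 1) == some '1'
    if curr && prev then mid
    else if curr && (mid == 0) then mid
    else if curr && !prev then taskGo s left (mid - 1)
    else taskGo s (mid + 1) right
  else -1
termination_by (right + 1 - left).toNat
decreasing_by
  · have := pvMidBounds left right h; omega
  · have := pvMidBounds left right h; omega

def task (string : String) : Int :=
  taskGo string.toList 0 ((string.toList.length : Int) - 1)

-- ===== PORT B =====
-- B's helper go(base, size): the sub-range string[base : base+size], Nat arithmetic
def taskAltGo (s : List Char) (base size : Nat) : Int :=
  if hz : size = 0 then -1
  else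
    let half := (size - 1) / 2
    let mid := base + half
    if s[mid]? = some '0' then
      if mid = 0 ∨ s[mid - 1]? = some '1' then (mid : Int)
      else taskAltGo s base half
    else taskAltGo s (mid + 1) (size / 2)
termination_by size
decreasing_by all_goals omega

def task_alt (string : String) : Int :=
  taskAltGo string.toList 0 string.toList.length

-- ===== PRECONDITION & SPEC =====
def Spec_task (string : String) (out : Int) : Prop := out = task_alt string
instance (string : String) (out : Int) : Decidable (Spec_task string out) := by unfold Spec_task; infer_instance

-- ===== CLAIM (what is proved, stated in full; the proofs are below) =====
def Claim_equal_task : Prop := ∀ (string : String), Dom_task string → Spec_task string (task string)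

-- ===== LEMMAS AND PROOFS =====

-- A's (left, right) run equals B's (base, size) run when left = base, right = base + size - 1
-- and the whole window lies inside the string.
theorem taskGo_eq (s : List Char) :
    ∀ (n base size : Nat), size ≤ n → base + size ≤ s.length →
      taskGo s (base : Int) ((base : Int) + (size : Int) - 1) = taskAltGo s base size := by
  intro n
  induction n with
  | zero =>
    intro base size hn _
    have hz : size = 0 := by omega
    subst hz
    unfold taskGo taskAltGo
    rw [dif_neg (by omega), dif_pos rfl]
  | succ n ih =>
    intro base size hn hlen
    match hsz : size with
    | 0 =>
      unfold taskGo taskAltGo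
      rw [dif_neg (by omega), dif_pos rfl]
    | k + 1 =>
      subst hsz
      -- the two midpoints agree
      have hmid : PySem.Int.floordiv ((base : Int) + ((base : Int) + ((k + 1 : Nat) : Int) - 1)) 2
          = ((base + k / 2 : Nat) : Int) := by
        rw [PySem.Int.floordiv_eq_ediv_of_pos (by norm_num : (0:Int) < 2)]
        have h1 : (base : Int) + ((base : Int) + ((k + 1 : Nat) : Int) - 1)
            = ((2 * base + k : Nat) : Int) := by push_cast; ring
        rw [h1, show ((2:Int)) = ((2:Nat):Int) from rfl, ← Int.natCast_ediv]
        exact congrArg _ (by omega)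
      have hmlt : base + k / 2 < s.length := by omega
      have hhalf : (k + 1 - 1) / 2 = k / 2 := by omega
      unfold taskGo taskAltGo
      rw [dif_pos (by push_cast; omega), dif_neg (Nat.succ_ne_zero k)]
      simp only [hmid, hhalf]
      have hcurr : PySem.List.pyGet? s ((base + k / 2 : Nat) : Int) = s[base + k / 2]? :=
        PySem.List.pyGet?_natCast s (base + k / 2)
      rw [hcurr]
      by_cases hc : s[base + k / 2]? = some '0'
      · by_cases h0 : base + k / 2 = 0
        · -- mid = 0: A returns it through one of its first two accepting branches
          rw [h0] at hc ⊢
          rw [if_pos (Or.inl rfl)]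
          by_cases hp : PySem.List.pyGet? s (-1) = some '1'
          · rw [if_pos (by simp [hc, hp]), if_pos hc]
          · rw [if_neg (by simp [hp]), if_pos (by simp [hc]), if_pos hc]
        · -- mid ≥ 1: prev is a plain in-range read
          have hm0 : ((base + k / 2 : Nat) : Int) ≠ 0 := by exact_mod_cast h0
          have hprev : PySem.List.pyGet? s (((base + k / 2 : Nat) : Int) - 1)
              = s[base + k / 2 - 1]? := by
            rw [show ((base + k / 2 : Nat) : Int) - 1 = ((base + k / 2 - 1 : Nat) : Int) by
              push_cast [h0]; omega]
            exact PySem.List.pyGet?_natCast s (base + k / 2 - 1)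
          rw [hprev, if_pos hc]
          by_cases hp : s[base + k / 2 - 1]? = some '1'
          · rw [if_pos (by simp [hc, hp]), if_pos (Or.inr hp)]
          · -- recurse left: A's (base, mid-1) window is B's (base, half) window
            rw [if_neg (by simp [hp]), if_neg (by simp [hc]; omega), if_pos (by simp [hc, hp]),
              if_neg (by simp [hp]; omega),
              show ((base + k / 2 : Nat) : Int) - 1 = (base : Int) + ((k / 2 : Nat) : Int) - 1 by
                push_cast; ring]
            exact ih base (k / 2) (by omega) (by omega)
      · -- curr false: recurse right; A's (mid+1, right) window is B's (mid+1, size/2) window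
        rw [if_neg (by simp [hc]), if_neg (by simp [hc]), if_neg (by simp [hc]), if_neg hc,
          show ((base + k / 2 : Nat) : Int) + 1 = ((base + k / 2 + 1 : Nat) : Int) by push_cast; ring,
          show (base : Int) + ((k + 1 : Nat) : Int) - 1
              = ((base + k / 2 + 1 : Nat) : Int) + (((k + 1) / 2 : Nat) : Int) - 1 by push_cast; omega]
        exact ih (base + k / 2 + 1) ((k + 1) / 2) (by omega) (by omega)

-- ===== VERDICT (by name: the statement is the Claim_ definition above) =====
theorem task_spec : Claim_equal_task := by
  intro string _
  unfold Spec_task task task_alt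
  have := taskGo_eq string.toList string.toList.length 0 string.toList.length le_rfl (by omega)
  simpa using this
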